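-- pv_equiv track=rewrite | github.com/FabianGermany/reinforcement-learning-project-game | my_game.py | discretize_RGB_val
-- ===== SOURCE A (Python) =====
-- def discretize_RGB_val(list_of_256_value): #from 0...255 RGB value to [0,1,2,3]
--     list_of_discretized_value = [None] * len(list_of_256_value)  # initialize list
--     for i in range(len(list_of_256_value)):
--         if(list_of_256_value[i]<64):
--             list_of_discretized_value[i] = 0
--         elif(list_of_256_value[i]<128):
--             list_of_discretized_value[i] = 1
--         elif(list_of_256_value[i]<192):
--             list_of_discretized_value[i] = 2
--         else: #list_of_256_value[i]<256
--             list_of_discretized_value[i] = 3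
--     return list_of_discretized_value
-- ===== SOURCE B (Python) =====
-- def discretize_RGB_val(list_of_256_value): #from 0...255 RGB value to [0,1,2,3]
--     cuts = [64, 128, 192]
--     def br(v):  # bisect_right over the threshold table
--         lo, hi = 0, len(cuts)
--         while lo < hi:
--             mid = (lo + hi) // 2
--             if v < cuts[mid]:
--                 hi = mid
--             else:
--                 lo = mid + 1
--         return lo
--     return [br(v) for v in list_of_256_value]
-- ===== Notes on version B (the rewrite author's own statement) =====
-- stated objective: alternative
-- what changed: Replaces the per-element if/elif linear scan over thresholds by a hand-written bisect_right binary search over a fixed threshold table [64,128,192], mapped over the input.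
import Mathlib
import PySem

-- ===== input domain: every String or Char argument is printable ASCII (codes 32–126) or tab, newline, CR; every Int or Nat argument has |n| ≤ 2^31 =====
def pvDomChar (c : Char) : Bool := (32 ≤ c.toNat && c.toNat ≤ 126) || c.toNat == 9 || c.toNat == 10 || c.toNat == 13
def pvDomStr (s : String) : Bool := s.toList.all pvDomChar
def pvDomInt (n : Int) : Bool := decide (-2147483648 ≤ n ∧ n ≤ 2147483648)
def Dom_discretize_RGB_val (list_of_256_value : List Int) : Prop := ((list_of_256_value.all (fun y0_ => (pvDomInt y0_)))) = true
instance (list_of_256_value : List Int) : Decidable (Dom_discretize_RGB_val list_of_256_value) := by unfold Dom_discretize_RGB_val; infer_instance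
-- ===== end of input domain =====

-- B replaces A's if/elif threshold chain by a bisect_right binary search over a fixed cut table (alternative decomposition, same cost).

-- ===== PORT A =====
-- A's loop 'for i in range(len(xs))' assigning slot i of a preallocated list, in order,
-- is ported as a left fold over that range appending the i-th discretized value.
def discretize_RGB_val (list_of_256_value : List Int) : List Int :=
  (PySem.List.pyRange 0 list_of_256_value.length 1).foldl
    (fun acc i =>
      let v := PySem.List.pyGetD list_of_256_value i 0
      acc ++ [if v < 64 then (0 : Int)
              else if v < 128 then 1
              else if v < 192 then 2
              else 3]) []

-- ===== PORT B =====
-- bisect_right's while-loop, recursion on hi - lo (cuts = [64,128,192])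
def pvBisect (v : Int) (lo hi : Nat) : Nat :=
  if _h : lo < hi then
    let mid := (lo + hi) / 2
    if v < PySem.List.pyGetD ([64, 128, 192] : List Int) (mid : Int) 0 then
      pvBisect v lo mid
    else
      pvBisect v (mid + 1) hi
  else lo
termination_by hi - lo
decreasing_by all_goals omega

def discretize_RGB_val_alt (list_of_256_value : List Int) : List Int :=
  list_of_256_value.map (fun v => ((pvBisect v 0 3 : Nat) : Int))

-- ===== PRECONDITION & SPEC =====
def Spec_discretize_RGB_val (list_of_256_value : List Int) (out : List Int) : Prop := out = discretize_RGB_val_alt list_of_256_value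
instance (list_of_256_value : List Int) (out : List Int) : Decidable (Spec_discretize_RGB_val list_of_256_value out) := by unfold Spec_discretize_RGB_val; infer_instance

-- ===== CLAIM (what is proved, stated in full; the proofs are below) =====
def Claim_equal_discretize_RGB_val : Prop := ∀ (list_of_256_value : List Int), Dom_discretize_RGB_val list_of_256_value → Spec_discretize_RGB_val list_of_256_value (discretize_RGB_val list_of_256_value)

-- ===== LEMMAS AND PROOFS =====

-- the binary search on the 3-cut table computes the if/elif chain
theorem pvBisect_eq (v : Int) :
    ((pvBisect v 0 3 : Nat) : Int)
      = if v < 64 then (0 : Int) else if v < 128 then 1 else if v < 192 then 2 else 3 := by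
  by_cases h1 : v < 64 <;> by_cases h2 : v < 128 <;> by_cases h3 : v < 192 <;>
    simp [pvBisect, PySem.List.pyGetD, PySem.List.pyGet?, PySem.List.pyIdx?, h1, h2, h3] <;> omega

-- fold that only appends one element per step is the map
theorem pvFoldl_append_map (g : Int → Int) (xs acc : List Int) :
    xs.foldl (fun a v => a ++ [g v]) acc = acc ++ xs.map g := by
  induction xs generalizing acc with
  | nil => simp
  | cons x t ih => simp [List.foldl_cons, ih]

theorem discretize_RGB_val_spec : Claim_equal_discretize_RGB_val := by
  intro xs _
  show _ = _
  simp only [discretize_RGB_val, discretize_RGB_val_alt]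
  rw [PySem.List.foldl_pyRange_zero_pyGetD' xs 0
        (fun acc v => acc ++ [if v < 64 then (0 : Int)
              else if v < 128 then 1
              else if v < 192 then 2
              else 3]) []]
  rw [pvFoldl_append_map, List.nil_append]
  exact List.map_congr_left fun v _ => (pvBisect_eq v).symm
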